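-- pv_equiv track=rewrite | github.com/guxinghuahuo/AZXGameAdder | game_helper.py | greedy_sequence
-- ===== SOURCE A (Python) =====
-- HEIGHT_MAX_WIDTH = {1: 9, 2: 4, 3: 3}
--
-- def build_prefix_sum(grid):
--     rows = len(grid)
--     cols = len(grid[0])
--     ps = [[0] * (cols + 1) for _ in range(rows + 1)]
--     for i in range(rows):
--         for j in range(cols):
--             v = grid[i][j]
--             val = 0 if v is None else v
--             ps[i + 1][j + 1] = (
--                 ps[i][j + 1] + ps[i + 1][j] - ps[i][j] + val
--             )
--     return ps
--
-- def rect_sum(ps, r1, c1, r2, c2):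
--     return (ps[r2 + 1][c2 + 1]
--             - ps[r1][c2 + 1]
--             - ps[r2 + 1][c1]
--             + ps[r1][c1])
--
-- def find_valid_rectangles(grid):
--     """
--     找出所有符合规则的矩形：
--       - 高度只能是 1、2、3
--       - 对应最大宽度：1→9，2→4，3→3
--       - 矩形内数字和为 10
--       - None 视为 0，可以被框进去
--     返回列表：(r1,c1,r2,c2,area)，按面积从小到大排序。
--     """
--     rows = len(grid)
--     cols = len(grid[0])
--     ps = build_prefix_sum(grid)
--
--     moves = []
--     for top in range(rows):
--         for left in range(cols):
--             for h in (1, 2, 3):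
--                 bottom = top + h - 1
--                 if bottom >= rows:
--                     break
--                 max_w = min(HEIGHT_MAX_WIDTH[h], cols - left)
--                 for w in range(1, max_w + 1):
--                     right = left + w - 1
--                     area = h * w
--                     if area < 2:
--                         continue
--                     s = rect_sum(ps, top, left, bottom, right)
--                     if s == 10:
--                         moves.append((top, left, bottom, right, area))
--
--     moves.sort(key=lambda x: (x[4], x[0], x[1]))
--     return moves
--
-- def greedy_sequence(grid, max_steps=1000):
--     """
--     贪心多步模拟：每一步选面积最小、最靠上的矩形；
--     选中格子数字全部置为 0（表示被消除）。
--     """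
--     work = [row[:] for row in grid]
--     steps = []
--
--     for _ in range(max_steps):
--         moves = find_valid_rectangles(work)
--         if not moves:
--             break
--         r1, c1, r2, c2, area = moves[0]
--         steps.append(moves[0])
--         for i in range(r1, r2 + 1):
--             for j in range(c1, c2 + 1):
--                 v = work[i][j]
--                 if v is not None and v != 0:
--                     work[i][j] = 0
--
--     return steps, work
-- ===== SOURCE B (Python) =====
-- def greedy_sequence(grid, max_steps=1000):
--     """Same greedy simulation, reorganised: no prefix-sum table and no sort —
--     each step builds the valid-rectangle list by a comprehension keyed
--     (area, top, left, bottom, right) and takes its plain tuple min; the chosen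
--     rectangle is cleared by rebuilding the grid with a comprehension."""
--     steps = []
--     work = [list(row) for row in grid]
--     step = 0
--     while step < max_steps:
--         step += 1
--         rows, cols = len(work), len(work[0])
--         cands = [(h * w, top, left, top + h - 1, left + w - 1)
--                  for top in range(rows)
--                  for left in range(cols)
--                  for h in (1, 2, 3)
--                  for w in range(1, min((9, 4, 3)[h - 1], cols - left) + 1)
--                  if top + h <= rows and h * w >= 2
--                  and sum(x or 0 for r in work[top:top + h]
--                          for x in r[left:left + w]) == 10]
--         if not cands:
--             break
--         area, r1, c1, r2, c2 = min(cands)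
--         steps.append((r1, c1, r2, c2, area))
--         work = [[0 if r1 <= i <= r2 and c1 <= j <= c2 and v not in (None, 0) else v
--                  for j, v in enumerate(row)]
--                 for i, row in enumerate(work)]
--     return steps, work
-- ===== Notes on version B (the rewrite author's own statement) =====
-- stated objective: alternative
-- what changed: B drops build_prefix_sum/rect_sum and the stable sort: one comprehension lists the valid rectangles keyed (area, top, left, bottom, right), a plain tuple min() replaces sort-and-take-head, rectangle sums are taken directly from the cells (None as 0), and the chosen rectangle is cleared by rebuilding the grid with a comprehension instead of in-place index assignment.
import Mathlib
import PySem

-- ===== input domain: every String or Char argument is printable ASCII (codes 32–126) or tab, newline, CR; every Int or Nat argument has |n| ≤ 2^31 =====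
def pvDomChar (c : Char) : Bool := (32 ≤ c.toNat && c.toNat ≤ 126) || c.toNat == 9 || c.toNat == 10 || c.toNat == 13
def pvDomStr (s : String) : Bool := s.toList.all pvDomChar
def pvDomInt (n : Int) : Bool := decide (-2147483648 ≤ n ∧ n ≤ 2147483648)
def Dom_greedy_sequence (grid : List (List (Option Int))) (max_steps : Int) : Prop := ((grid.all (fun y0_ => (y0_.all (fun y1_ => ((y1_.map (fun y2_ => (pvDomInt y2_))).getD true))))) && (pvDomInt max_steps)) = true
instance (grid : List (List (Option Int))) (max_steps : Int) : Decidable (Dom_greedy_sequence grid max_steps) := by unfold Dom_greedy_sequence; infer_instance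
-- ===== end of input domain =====

-- B replaces A's prefix-sum table, sort-and-take-head and in-place clearing by a
-- comprehension-built candidate list keyed (area, top, left, bottom, right), a plain
-- tuple min, direct cell sums and a grid rebuilt by comprehension (objective: alternative).

-- ===== PORT A =====
def pvVal (v : Option Int) : Int := match v with | none => 0 | some x => x  -- '0 if v is None else v'
def pvCellA (g : List (List (Option Int))) (i j : Nat) : Option Int := (g.getD i []).getD j none
def pvGet2 (ps : List (List Int)) (i j : Nat) : Int := (ps.getD i []).getD j 0
def pvSet2 (ps : List (List Int)) (i j : Nat) (x : Int) : List (List Int) :=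
  ps.set i ((ps.getD i []).set j x)

-- build_prefix_sum: zero table, then fill in row-major order (each entry from the
-- three earlier entries plus the cell value); literal nested-loop transliteration.
def buildPrefixSum (g : List (List (Option Int))) : List (List Int) :=
  let rows := g.length
  let cols := (g.headD []).length
  (List.range rows).foldl (fun ps i =>
    (List.range cols).foldl (fun ps j =>
      pvSet2 ps (i+1) (j+1)
        (pvGet2 ps i (j+1) + pvGet2 ps (i+1) j - pvGet2 ps i j + pvVal (pvCellA g i j))) ps)
    (List.replicate (rows+1) (List.replicate (cols+1) 0))

def rectSum (ps : List (List Int)) (r1 c1 r2 c2 : Nat) : Int :=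
  pvGet2 ps (r2+1) (c2+1) - pvGet2 ps r1 (c2+1) - pvGet2 ps (r2+1) c1 + pvGet2 ps r1 c1

-- HEIGHT_MAX_WIDTH = {1: 9, 2: 4, 3: 3}, only ever looked up at 1, 2, 3
def pvHMW (h : Nat) : Nat := if h = 1 then 9 else if h = 2 then 4 else 3

-- inner 'for w in range(1, max_w+1)' loop of find_valid_rectangles
def pvWLoopA (ps : List (List Int)) (top left h maxW : Nat)
    (moves : List (Int × Int × Int × Int × Int)) : List (Int × Int × Int × Int × Int) :=
  (List.range' 1 maxW).foldl (fun moves w =>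
    let right := left + w - 1
    let area := h * w
    if area < 2 then moves
    else if rectSum ps top left (top + h - 1) right = 10 then
      moves ++ [((top : Int), (left : Int), ((top + h - 1 : Nat) : Int), ((right : Nat) : Int), ((area : Nat) : Int))]
    else moves) moves

-- 'for h in (1, 2, 3): … if bottom >= rows: break'
def pvHLoopA (ps : List (List Int)) (rows cols top left : Nat) :
    List Nat → List (Int × Int × Int × Int × Int) → List (Int × Int × Int × Int × Int)
  | [], moves => moves
  | h :: hs, moves =>
    if rows ≤ top + h - 1 then moves  -- break
    else pvHLoopA ps rows cols top left hs
      (pvWLoopA ps top left h (min (pvHMW h) (cols - left)) moves)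

-- find_valid_rectangles; the sort key (x[4], x[0], x[1]) is a Python tuple compared
-- lexicographically: ported as the List Int key [area, top, left] (List's < is lex)
def findValidA (work : List (List (Option Int))) : List (Int × Int × Int × Int × Int) :=
  let rows := work.length
  let cols := (work.headD []).length
  let ps := buildPrefixSum work
  let moves := (List.range rows).foldl (fun moves top =>
    (List.range cols).foldl (fun moves left =>
      pvHLoopA ps rows cols top left [1, 2, 3] moves) moves) []
  PySem.List.sorted moves (fun x => [x.2.2.2.2, x.1, x.2.1]) false

-- 'for i in range(r1, r2+1): for j in range(c1, c2+1): if v is not None and v != 0: work[i][j] = 0'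
def pvZeroA (work : List (List (Option Int))) (r1 c1 r2 c2 : Nat) : List (List (Option Int)) :=
  (List.range' r1 (r2 + 1 - r1)).foldl (fun work i =>
    (List.range' c1 (c2 + 1 - c1)).foldl (fun work j =>
      match (work.getD i []).getD j none with
      | none => work
      | some v => if v ≠ 0 then work.set i ((work.getD i []).set j (some 0)) else work) work) work

def pvGreedyA : Nat → List (List (Option Int)) → List (Int × Int × Int × Int × Int) →
    (List (Int × Int × Int × Int × Int)) × List (List (Option Int))
  | 0, work, steps => (steps, work)
  | n + 1, work, steps =>
    match findValidA work with
    | [] => (steps, work)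
    | m :: _ =>
      pvGreedyA n (pvZeroA work m.1.toNat m.2.1.toNat m.2.2.1.toNat m.2.2.2.1.toNat) (steps ++ [m])

def greedy_sequence (grid : List (List (Option Int))) (max_steps : Int) :
    (List (Int × Int × Int × Int × Int)) × List (List (Option Int)) :=
  pvGreedyA max_steps.toNat grid []

-- ===== PORT B =====
def pvOr0 (v : Option Int) : Int := match v with | none => 0 | some x => x  -- 'x or 0' on Optional[int] (0 or 0 = 0)
def pvCap (h : Nat) : Nat := [9, 4, 3].getD (h - 1) 0  -- '(9, 4, 3)[h - 1]' for h in (1, 2, 3)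

-- 'sum(x or 0 for r in work[top:top + h] for x in r[left:left + w])'
def pvBand (work : List (List (Option Int))) (top left h w : Nat) : Int :=
  ((PySem.List.slice work ((top : Nat) : Int) ((top + h : Nat) : Int)).map (fun r =>
    ((PySem.List.slice r ((left : Nat) : Int) ((left + w : Nat) : Int)).map pvOr0).sum)).sum

-- the candidate comprehension: tuples (h*w, top, left, top+h-1, left+w-1) in
-- enumeration order, filtered by the 'if' clause
def pvCandsB (work : List (List (Option Int))) : List (Int × Int × Int × Int × Int) :=
  (List.range work.length).flatMap (fun top =>
    (List.range (work.headD []).length).flatMap (fun left =>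
      ([1, 2, 3] : List Nat).flatMap (fun h =>
        (List.range' 1 (min (pvCap h) ((work.headD []).length - left))).filterMap (fun w =>
          if top + h ≤ work.length ∧ 2 ≤ h * w ∧ pvBand work top left h w = 10 then
            some (((h * w : Nat) : Int), ((top : Nat) : Int), ((left : Nat) : Int),
                  ((top + h - 1 : Nat) : Int), ((left + w - 1 : Nat) : Int))
          else none))))

-- Python's min on 5-tuples of ints compares lexicographically: ported with the
-- equal-length List Int key (List's < is lexicographic); min? keeps the first minimum.
def pvKey5 (x : Int × Int × Int × Int × Int) : List Int :=
  [x.1, x.2.1, x.2.2.1, x.2.2.2.1, x.2.2.2.2]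

-- the clearing comprehension over enumerate(work) / enumerate(row)
def pvClearB (work : List (List (Option Int))) (r1 c1 r2 c2 : Int) : List (List (Option Int)) :=
  (PySem.List.enumerate work).map (fun p =>
    (PySem.List.enumerate p.2).map (fun q =>
      if r1 ≤ p.1 ∧ p.1 ≤ r2 ∧ c1 ≤ q.1 ∧ q.1 ≤ c2 ∧ q.2 ≠ none ∧ q.2 ≠ some 0 then
        some 0
      else q.2))

-- 'while step < max_steps: step += 1; …'
def pvLoopB (work : List (List (Option Int))) (steps : List (Int × Int × Int × Int × Int))
    (step maxs : Int) : (List (Int × Int × Int × Int × Int)) × List (List (Option Int)) :=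
  if _h : step < maxs then
    match PySem.List.min? (pvCandsB work) pvKey5 with
    | none => (steps, work)
    | some (area, r1, c1, r2, c2) =>
      pvLoopB (pvClearB work r1 c1 r2 c2) (steps ++ [(r1, c1, r2, c2, area)]) (step + 1) maxs
  else (steps, work)
termination_by (maxs - step).toNat
decreasing_by omega

def greedy_sequence_alt (grid : List (List (Option Int))) (max_steps : Int) :
    (List (Int × Int × Int × Int × Int)) × List (List (Option Int)) :=
  pvLoopB grid [] 0 max_steps

-- ===== PRECONDITION & SPEC =====
-- Pre_ excludes exactly the inputs where Python A raises IndexError: a greedy step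
-- actually runs (max_steps >= 1) on an empty grid (it evaluates grid[0]) or on a
-- ragged grid with a row shorter than row 0 (build_prefix_sum reads grid[i][j] for
-- every j < len(grid[0])).
def Pre_greedy_sequence (grid : List (List (Option Int))) (max_steps : Int) : Prop :=
  max_steps ≤ 0 ∨ (grid ≠ [] ∧ ∀ row ∈ grid, (grid.headD []).length ≤ row.length)
instance (grid : List (List (Option Int))) (max_steps : Int) : Decidable (Pre_greedy_sequence grid max_steps) := by unfold Pre_greedy_sequence; infer_instance
def pvWitness_greedy_sequence : List (List (Option Int)) × Int := ([[some 5, some 5], [some 1, none]], 3)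

def Spec_greedy_sequence (grid : List (List (Option Int))) (max_steps : Int) (out : (List (Int × Int × Int × Int × Int)) × List (List (Option Int))) : Prop := out = greedy_sequence_alt grid max_steps
instance (grid : List (List (Option Int))) (max_steps : Int) (out : (List (Int × Int × Int × Int × Int)) × List (List (Option Int))) : Decidable (Spec_greedy_sequence grid max_steps out) := by unfold Spec_greedy_sequence; infer_instance

-- ===== CLAIM (what is proved, stated in full; the proofs are below) =====
def Claim_equal_greedy_sequence : Prop := ∀ (grid : List (List (Option Int))) (max_steps : Int), Dom_greedy_sequence grid max_steps → Pre_greedy_sequence grid max_steps → Spec_greedy_sequence grid max_steps (greedy_sequence grid max_steps)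

-- ===== LEMMAS AND PROOFS =====

-- ---------- generic list facts ----------
theorem pv_sum_map_sub {α : Type} (l : List α) (f g : α → Int) :
    (l.map (fun x => f x - g x)).sum = (l.map f).sum - (l.map g).sum := by
  induction l with
  | nil => simp
  | cons a l ih => simp [ih]; ring

-- ---------- prefix-sum correctness (A side) ----------
def pvRowSum (row : List (Option Int)) (j : Nat) : Int := ((row.take j).map pvVal).sum
def pvP (g : List (List (Option Int))) (i j : Nat) : Int :=
  ((g.take i).map (fun row => pvRowSum row j)).sum

theorem pvRowSum_zero (row : List (Option Int)) : pvRowSum row 0 = 0 := by simp [pvRowSum]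

theorem pvP_zero_left (g : List (List (Option Int))) (j : Nat) : pvP g 0 j = 0 := by simp [pvP]

theorem pvP_zero_right (g : List (List (Option Int))) (i : Nat) : pvP g i 0 = 0 := by
  simp [pvP, pvRowSum_zero]

theorem pvRowSum_succ (row : List (Option Int)) (j : Nat) :
    pvRowSum row (j+1) = pvRowSum row j + pvVal (row.getD j none) := by
  by_cases h : j < row.length
  · simp only [pvRowSum, List.map_take]
    rw [List.sum_take_succ _ j (by simpa)]
    simp [List.getElem?_eq_getElem h]
  · have hle : row.length ≤ j := by omega
    rw [pvRowSum, pvRowSum, List.take_of_length_le hle, List.take_of_length_le (by omega),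
      List.getD_eq_default _ _ hle]
    simp [pvVal]

theorem pvP_succ (g : List (List (Option Int))) (i c : Nat) (hi : i < g.length) :
    pvP g (i+1) c = pvP g i c + pvRowSum (g.getD i []) c := by
  simp only [pvP, List.map_take]
  rw [List.sum_take_succ _ i (by simpa)]
  simp [List.getElem?_eq_getElem hi]

theorem pvP_rec (g : List (List (Option Int))) (i j : Nat) (hi : i < g.length) :
    pvP g i (j+1) + pvP g (i+1) j - pvP g i j + pvVal (pvCellA g i j) = pvP g (i+1) (j+1) := by
  rw [pvP_succ g i (j+1) hi, pvP_succ g i j hi, pvRowSum_succ]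
  unfold pvCellA
  ring

def pvMid (g : List (List (Option Int))) (rows cols i j : Nat) : List (List Int) :=
  (List.range (rows+1)).map (fun r =>
    (List.range (cols+1)).map (fun c =>
      if r ≤ i ∨ (r = i+1 ∧ c ≤ j) then pvP g r c else 0))

theorem pvGet2_mid (g : List (List (Option Int))) (rows cols i j r c : Nat)
    (hr : r ≤ rows) (hc : c ≤ cols) :
    pvGet2 (pvMid g rows cols i j) r c = if r ≤ i ∨ (r = i+1 ∧ c ≤ j) then pvP g r c else 0 := by
  unfold pvGet2 pvMid
  rw [PySem.List.getD_map_range _ _ _ _ (by omega), PySem.List.getD_map_range _ _ _ _ (by omega)]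

theorem pvMid_start (g : List (List (Option Int))) (rows cols : Nat) :
    pvMid g rows cols 0 0 = List.replicate (rows+1) (List.replicate (cols+1) 0) := by
  apply List.ext_getElem (by simp [pvMid])
  intro r hr hr'
  simp only [pvMid, List.getElem_map, List.getElem_range, List.getElem_replicate]
  apply List.ext_getElem (by simp)
  intro c hc hc'
  simp only [List.getElem_map, List.getElem_range, List.getElem_replicate]
  split_ifs with h
  · rcases h with h | ⟨h1, h2⟩
    · have : r = 0 := by omega
      subst this; exact pvP_zero_left g c
    · have : c = 0 := by omega
      subst this; exact pvP_zero_right g r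
  · rfl

theorem pvSet2_mid (g : List (List (Option Int))) (rows cols i j : Nat)
    (hi : i < rows) (_hj : j < cols) :
    pvSet2 (pvMid g rows cols i j) (i+1) (j+1) (pvP g (i+1) (j+1)) = pvMid g rows cols i (j+1) := by
  unfold pvSet2 pvMid
  rw [PySem.List.getD_map_range _ _ _ _ (by omega)]
  apply List.ext_getElem (by simp)
  intro r hr hr'
  rw [List.getElem_set]
  by_cases hri : i + 1 = r
  · rw [if_pos hri]
    have hr2 : r < rows + 1 := by simpa using hr'
    simp only [List.getElem_map, List.getElem_range]
    apply List.ext_getElem (by simp)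
    intro c hc hc'
    rw [List.getElem_set]
    simp only [List.getElem_map, List.getElem_range]
    by_cases hcj : j + 1 = c
    · rw [if_pos hcj]
      have : r ≤ i ∨ (r = i + 1 ∧ c ≤ j + 1) := by omega
      rw [if_pos this, ← hri, ← hcj]
    · rw [if_neg hcj]
      subst hri
      simp only [true_and]
      exact if_congr (by omega) rfl rfl
  · rw [if_neg hri]
    simp only [List.getElem_map, List.getElem_range]
    apply List.ext_getElem (by simp)
    intro c hc hc'
    simp only [List.getElem_map, List.getElem_range]
    exact if_congr (by omega) rfl rfl

theorem pvMid_shift (g : List (List (Option Int))) (rows cols i : Nat) :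
    pvMid g rows cols i cols = pvMid g rows cols (i+1) 0 := by
  unfold pvMid
  apply List.ext_getElem (by simp)
  intro r hr hr'
  simp only [List.getElem_map, List.getElem_range]
  apply List.ext_getElem (by simp)
  intro c hc hc'
  simp only [List.getElem_map, List.getElem_range]
  have hcle : c ≤ cols := by
    have := hc; simp at this; omega
  by_cases h1 : r ≤ i ∨ (r = i + 1 ∧ c ≤ cols)
  · rw [if_pos h1, if_pos (by omega)]
  · rw [if_neg h1]
    by_cases h2 : r ≤ i + 1 ∨ (r = i + 2 ∧ c ≤ 0)
    · have hc0 : c = 0 := by omega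
      rw [if_pos h2, hc0, pvP_zero_right]
    · rw [if_neg h2]

theorem pvBuild_eq (g : List (List (Option Int))) :
    buildPrefixSum g = pvMid g g.length ((g.headD []).length) g.length 0 := by
  have inner : ∀ (i : Nat), i < g.length → ∀ (j : Nat), j ≤ (g.headD []).length →
      (List.range j).foldl (fun ps j =>
        pvSet2 ps (i+1) (j+1)
          (pvGet2 ps i (j+1) + pvGet2 ps (i+1) j - pvGet2 ps i j + pvVal (pvCellA g i j)))
        (pvMid g g.length ((g.headD []).length) i 0)
      = pvMid g g.length ((g.headD []).length) i j := by
    intro i hi j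
    induction j with
    | zero => intro _; simp
    | succ j ih =>
      intro _hj
      rw [List.range_succ, List.foldl_append, ih (by omega)]
      simp only [List.foldl_cons, List.foldl_nil]
      rw [pvGet2_mid g _ _ i j i (j+1) (by omega) (by omega),
        pvGet2_mid g _ _ i j (i+1) j (by omega) (by omega),
        pvGet2_mid g _ _ i j i j (by omega) (by omega)]
      rw [if_pos (by omega : i ≤ i ∨ (i = i + 1 ∧ j + 1 ≤ j)),
        if_pos (by omega : i + 1 ≤ i ∨ (i + 1 = i + 1 ∧ j ≤ j)),
        if_pos (by omega : i ≤ i ∨ (i = i + 1 ∧ j ≤ j))]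
      rw [pvP_rec g i j hi, pvSet2_mid g _ _ i j hi (by omega)]
  have outer : ∀ (i : Nat), i ≤ g.length →
      (List.range i).foldl (fun ps i =>
        (List.range ((g.headD []).length)).foldl (fun ps j =>
          pvSet2 ps (i+1) (j+1)
            (pvGet2 ps i (j+1) + pvGet2 ps (i+1) j - pvGet2 ps i j + pvVal (pvCellA g i j))) ps)
        (pvMid g g.length ((g.headD []).length) 0 0)
      = pvMid g g.length ((g.headD []).length) i 0 := by
    intro i
    induction i with
    | zero => intro _; rfl
    | succ i ih =>
      intro hi
      rw [List.range_succ, List.foldl_append, ih (by omega)]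
      simp only [List.foldl_cons, List.foldl_nil]
      rw [inner i (by omega) ((g.headD []).length) (le_refl _), pvMid_shift]
  simp only [buildPrefixSum]
  rw [← pvMid_start g g.length ((g.headD []).length)]
  exact outer g.length (le_refl _)

theorem pvGet2_build (g : List (List (Option Int))) (r c : Nat)
    (hr : r ≤ g.length) (hc : c ≤ (g.headD []).length) :
    pvGet2 (buildPrefixSum g) r c = pvP g r c := by
  rw [pvBuild_eq, pvGet2_mid g _ _ _ _ r c hr hc, if_pos (by omega)]

theorem pvSeg_row (row : List (Option Int)) (left w : Nat) :
    pvRowSum row (left + w) - pvRowSum row left = (((row.drop left).take w).map pvVal).sum := by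
  unfold pvRowSum
  rw [List.take_add, List.map_append, List.sum_append]
  ring

theorem pvSeg_col (g : List (List (Option Int))) (top h c : Nat) :
    pvP g (top + h) c - pvP g top c = (((g.drop top).take h).map (fun row => pvRowSum row c)).sum := by
  unfold pvP
  rw [List.take_add, List.map_append, List.sum_append]
  ring

theorem pvOr0_eq_pvVal : pvOr0 = pvVal := rfl

-- rectSum over the prefix table = B's direct band sum
theorem pvRect_eq (g : List (List (Option Int))) (top left h w : Nat)
    (hh : 1 ≤ h) (hw : 1 ≤ w) (hr : top + h ≤ g.length) (hc : left + w ≤ (g.headD []).length) :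
    rectSum (buildPrefixSum g) top left (top + h - 1) (left + w - 1)
      = pvBand g top left h w := by
  unfold rectSum pvBand
  rw [pvOr0_eq_pvVal]
  have e1 : top + h - 1 + 1 = top + h := by omega
  have e2 : left + w - 1 + 1 = left + w := by omega
  rw [e1, e2]
  rw [pvGet2_build g (top + h) (left + w) hr hc,
    pvGet2_build g top (left + w) (by omega) hc,
    pvGet2_build g (top + h) left hr (by omega),
    pvGet2_build g top left (by omega) (by omega)]
  simp only [PySem.List.slice_natCast]
  have e3 : top + h - top = h := by omega
  rw [e3]
  have hrow : ∀ row : List (Option Int),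
      ((List.take (left + w - left) (List.drop left row)).map pvVal).sum
        = pvRowSum row (left + w) - pvRowSum row left := by
    intro row
    rw [pvSeg_row, Nat.add_sub_cancel_left]
  calc pvP g (top + h) (left + w) - pvP g top (left + w) - pvP g (top + h) left + pvP g top left
      = (pvP g (top + h) (left + w) - pvP g top (left + w))
        - (pvP g (top + h) left - pvP g top left) := by ring
    _ = (((g.drop top).take h).map (fun row => pvRowSum row (left + w))).sum
        - (((g.drop top).take h).map (fun row => pvRowSum row left)).sum := by
        rw [pvSeg_col, pvSeg_col]
    _ = (((g.drop top).take h).map (fun row => pvRowSum row (left + w) - pvRowSum row left)).sum := by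
        rw [pv_sum_map_sub]
    _ = _ := by
        apply congrArg
        apply List.map_congr_left
        intro row _
        rw [hrow row]

-- ---------- the candidate list, A's loops flattened, B's loops flattened ----------
def pvMk (top left h w : Nat) : Int × Int × Int × Int × Int :=
  ((top : Int), (left : Int), ((top + h - 1 : Nat) : Int), ((left + w - 1 : Nat) : Int), ((h * w : Nat) : Int))

def pvWChunk (g : List (List (Option Int))) (top left h maxW : Nat) :
    List (Int × Int × Int × Int × Int) :=
  (List.range' 1 maxW).filterMap (fun w =>
    if h * w < 2 then none
    else if pvBand g top left h w = 10 then some (pvMk top left h w)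
    else none)

def pvHChunk (g : List (List (Option Int))) (rows cols top left : Nat) :
    List (Int × Int × Int × Int × Int) :=
  if rows ≤ top then [] else
    pvWChunk g top left 1 (min 9 (cols - left)) ++
    (if rows ≤ top + 1 then [] else
      pvWChunk g top left 2 (min 4 (cols - left)) ++
      (if rows ≤ top + 2 then [] else pvWChunk g top left 3 (min 3 (cols - left))))

def pvCand (g : List (List (Option Int))) : List (Int × Int × Int × Int × Int) :=
  (List.range g.length).flatMap (fun top =>
    (List.range (g.headD []).length).flatMap (fun left =>
      pvHChunk g g.length ((g.headD []).length) top left))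

def pvKey (m : Int × Int × Int × Int × Int) : List Int := [m.2.2.2.2, m.1, m.2.1]

def pvHStep (o : Option (Int × Int × Int × Int × Int)) (x : Int × Int × Int × Int × Int) :
    Option (Int × Int × Int × Int × Int) :=
  match o with
  | none => some x
  | some m => if decide (pvKey x < pvKey m) = true then some x else some m

def pvPhi (m : Int × Int × Int × Int × Int) : Int × Int × Int × Int × Int :=
  (m.2.2.2.2, m.1, m.2.1, m.2.2.1, m.2.2.2.1)

def pvStepF (o : Option (Int × Int × Int × Int × Int)) (x : Int × Int × Int × Int × Int) :
    Option (Int × Int × Int × Int × Int) :=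
  match o with
  | none => some x
  | some m => if pvKey5 (pvPhi x) < pvKey5 (pvPhi m) then some x else some m

theorem pvWLoopA_eq (g : List (List (Option Int))) (top left h maxW : Nat) (hh : 1 ≤ h)
    (hr : top + h ≤ g.length) (hmw : left + maxW ≤ (g.headD []).length)
    (moves : List (Int × Int × Int × Int × Int)) :
    pvWLoopA (buildPrefixSum g) top left h maxW moves = moves ++ pvWChunk g top left h maxW := by
  induction maxW generalizing moves with
  | zero => simp [pvWLoopA, pvWChunk]
  | succ n ih =>
    unfold pvWLoopA pvWChunk
    rw [List.range'_concat, List.foldl_append, List.filterMap_append]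
    have ihn := ih (by omega) moves
    unfold pvWLoopA pvWChunk at ihn
    rw [ihn]
    simp only [List.foldl_cons, List.foldl_nil, List.filterMap_cons, List.filterMap_nil]
    have e1 : 1 + 1 * n = n + 1 := by omega
    rw [e1]
    by_cases h2 : h * (n + 1) < 2
    · rw [if_pos h2, if_pos h2]
      simp
    · rw [if_neg h2, if_neg h2]
      rw [pvRect_eq g top left h (n+1) hh (by omega) hr (by omega)]
      by_cases h10 : pvBand g top left h (n+1) = 10
      · rw [if_pos h10, if_pos h10]
        simp [pvMk, List.append_assoc]
      · rw [if_neg h10, if_neg h10]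
        simp

theorem pvHLoopA_eq (g : List (List (Option Int))) (top left : Nat)
    (hl : left < (g.headD []).length) (moves : List (Int × Int × Int × Int × Int)) :
    pvHLoopA (buildPrefixSum g) g.length ((g.headD []).length) top left [1, 2, 3] moves
      = moves ++ pvHChunk g g.length ((g.headD []).length) top left := by
  unfold pvHChunk
  simp only [pvHLoopA]
  rw [show pvHMW 1 = 9 from rfl, show pvHMW 2 = 4 from rfl, show pvHMW 3 = 3 from rfl]
  by_cases b1 : g.length ≤ top + 1 - 1
  · rw [if_pos b1, if_pos (by omega : g.length ≤ top)]
    simp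
  · rw [if_neg b1, if_neg (by omega : ¬ g.length ≤ top),
      pvWLoopA_eq g top left 1 (min 9 ((g.headD []).length - left)) (by omega) (by omega) (by omega)]
    by_cases b2 : g.length ≤ top + 2 - 1
    · rw [if_pos b2, if_pos (by omega : g.length ≤ top + 1)]
      simp
    · rw [if_neg b2, if_neg (by omega : ¬ g.length ≤ top + 1),
        pvWLoopA_eq g top left 2 (min 4 ((g.headD []).length - left)) (by omega) (by omega) (by omega)]
      by_cases b3 : g.length ≤ top + 3 - 1
      · rw [if_pos b3, if_pos (by omega : g.length ≤ top + 2)]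
        simp
      · rw [if_neg b3, if_neg (by omega : ¬ g.length ≤ top + 2),
          pvWLoopA_eq g top left 3 (min 3 ((g.headD []).length - left)) (by omega) (by omega) (by omega)]
        simp [List.append_assoc]

theorem pvFindValidA_eq (work : List (List (Option Int))) :
    findValidA work = PySem.List.sorted (pvCand work) (fun x => [x.2.2.2.2, x.1, x.2.1]) false := by
  simp only [findValidA]
  congr 1
  have inner : ∀ (top : Nat) (moves : List (Int × Int × Int × Int × Int)),
      (List.range ((work.headD []).length)).foldl (fun moves left =>
        pvHLoopA (buildPrefixSum work) work.length ((work.headD []).length) top left [1, 2, 3] moves) moves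
      = moves ++ (List.range ((work.headD []).length)).flatMap
          (fun left => pvHChunk work work.length ((work.headD []).length) top left) := by
    intro top moves
    refine (PySem.List.foldl_congr_mem _ _ _ _
      (fun acc left hmem => pvHLoopA_eq work top left (List.mem_range.mp hmem) acc)).trans ?_
    exact PySem.List.foldl_append_eq_flatMap _ _ _
  refine ((PySem.List.foldl_congr_mem _ _ _ _ (fun acc top _ => inner top acc)).trans ?_)
  rw [PySem.List.foldl_append_eq_flatMap]
  simp [pvCand]

-- ---------- B's comprehension = φ-image of A's candidate list ----------
theorem pvWChunkB_eq (g : List (List (Option Int))) (top left h maxW : Nat)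
    (hrows : top + h ≤ g.length) :
    (List.range' 1 maxW).filterMap (fun w =>
      if top + h ≤ g.length ∧ 2 ≤ h * w ∧ pvBand g top left h w = 10 then
        some (((h * w : Nat) : Int), ((top : Nat) : Int), ((left : Nat) : Int),
              ((top + h - 1 : Nat) : Int), ((left + w - 1 : Nat) : Int))
      else none)
    = (pvWChunk g top left h maxW).map pvPhi := by
  unfold pvWChunk
  rw [List.map_filterMap]
  apply List.filterMap_congr
  intro w _
  by_cases h2 : h * w < 2
  · rw [if_neg (by omega : ¬ (top + h ≤ g.length ∧ 2 ≤ h * w ∧ pvBand g top left h w = 10)),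
      if_pos h2]
    rfl
  · rw [if_neg h2]
    by_cases h10 : pvBand g top left h w = 10
    · rw [if_pos ⟨hrows, by omega, h10⟩, if_pos h10]
      rfl
    · rw [if_neg (by tauto), if_neg h10]
      rfl

theorem pvWChunkB_nil (g : List (List (Option Int))) (top left h maxW : Nat)
    (hrows : g.length < top + h) :
    (List.range' 1 maxW).filterMap (fun w =>
      if top + h ≤ g.length ∧ 2 ≤ h * w ∧ pvBand g top left h w = 10 then
        some (((h * w : Nat) : Int), ((top : Nat) : Int), ((left : Nat) : Int),
              ((top + h - 1 : Nat) : Int), ((left + w - 1 : Nat) : Int))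
      else none)
    = [] := by
  rw [List.filterMap_eq_nil_iff]
  intro w _
  rw [if_neg (by omega : ¬ (top + h ≤ g.length ∧ 2 ≤ h * w ∧ pvBand g top left h w = 10))]

theorem pvCandsB_eq (g : List (List (Option Int))) :
    pvCandsB g = (pvCand g).map pvPhi := by
  unfold pvCandsB pvCand
  rw [List.map_flatMap]
  apply List.flatMap_congr
  intro top _
  rw [List.map_flatMap]
  apply List.flatMap_congr
  intro left _
  simp only [List.flatMap_cons, List.flatMap_nil, List.append_nil]
  rw [show pvCap 1 = 9 from rfl, show pvCap 2 = 4 from rfl, show pvCap 3 = 3 from rfl]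
  unfold pvHChunk
  by_cases b1 : g.length ≤ top
  · rw [if_pos b1, pvWChunkB_nil _ _ _ _ _ (by omega), pvWChunkB_nil _ _ _ _ _ (by omega),
      pvWChunkB_nil _ _ _ _ _ (by omega)]
    simp
  · rw [if_neg b1, pvWChunkB_eq _ _ _ _ _ (by omega)]
    by_cases b2 : g.length ≤ top + 1
    · rw [if_pos b2, pvWChunkB_nil _ _ _ _ _ (by omega), pvWChunkB_nil _ _ _ _ _ (by omega)]
      simp
    · rw [if_neg b2, pvWChunkB_eq _ _ _ _ _ (by omega)]
      by_cases b3 : g.length ≤ top + 2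
      · rw [if_pos b3, pvWChunkB_nil _ _ _ _ _ (by omega)]
        simp
      · rw [if_neg b3, pvWChunkB_eq _ _ _ _ _ (by omega)]
        simp [List.map_append]

-- min? of the φ-image = φ of the full-key fold over the original list
theorem pvMinB_fold (l : List (Int × Int × Int × Int × Int)) :
    PySem.List.min? (l.map pvPhi) pvKey5 = Option.map pvPhi (l.foldl pvStepF none) := by
  have hdef : PySem.List.min? (l.map pvPhi) pvKey5
      = (l.map pvPhi).foldl (fun acc x =>
          match acc with
          | none => some x
          | some m => if pvKey5 x < pvKey5 m then some x else some m) none := by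
    unfold PySem.List.min?
    congr 1
    funext acc x
    cases acc <;> simp
  rw [hdef]
  suffices h : ∀ (l : List (Int × Int × Int × Int × Int))
      (o : Option (Int × Int × Int × Int × Int)),
      List.foldl (fun acc x =>
        match acc with
        | none => some x
        | some m => if pvKey5 x < pvKey5 m then some x else some m)
        (Option.map pvPhi o) (l.map pvPhi)
      = Option.map pvPhi (l.foldl pvStepF o) by
    have := h l none
    simp only [Option.map_none] at this
    exact this
  intro l
  induction l with
  | nil => intro o; rfl
  | cons x t ih =>
    intro o
    simp only [List.map_cons, List.foldl_cons]
    have step : (match Option.map pvPhi o with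
        | none => some (pvPhi x)
        | some m => if pvKey5 (pvPhi x) < pvKey5 m then some (pvPhi x) else some m)
        = Option.map pvPhi (pvStepF o x) := by
      cases o with
      | none => rfl
      | some m =>
        simp only [Option.map_some, pvStepF]
        split <;> simp
    rw [step, ih (pvStepF o x)]

-- ---------- lexicographic comparisons, componentwise ----------
theorem pv_lt3_iff (a t l a' t' l' : Int) :
    (([a, t, l] : List Int) < [a', t', l']) ↔ (a < a' ∨ (a = a' ∧ (t < t' ∨ (t = t' ∧ l < l')))) := by
  show List.Lex _ _ _ ↔ _
  simp [List.cons_lex_cons_iff]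

theorem pv_lt5_iff (a t l b r a' t' l' b' r' : Int) :
    (([a, t, l, b, r] : List Int) < [a', t', l', b', r']) ↔
      (a < a' ∨ (a = a' ∧ (t < t' ∨ (t = t' ∧ (l < l' ∨ (l = l' ∧ (b < b' ∨ (b = b' ∧ r < r')))))))) := by
  show List.Lex _ _ _ ↔ _
  simp [List.cons_lex_cons_iff]

theorem pvKey5_phi (m : Int × Int × Int × Int × Int) :
    pvKey5 (pvPhi m) = [m.2.2.2.2, m.1, m.2.1, m.2.2.1, m.2.2.2.1] := rfl

theorem pv_key_lt_full (x m : Int × Int × Int × Int × Int) (h : pvKey x < pvKey m) :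
    pvKey5 (pvPhi x) < pvKey5 (pvPhi m) := by
  obtain ⟨t, l, b, r, a⟩ := x
  obtain ⟨t', l', b', r', a'⟩ := m
  simp only [pvKey, pvKey5_phi, pv_lt3_iff, pv_lt5_iff] at *
  omega

theorem pv_full_asym (x m : Int × Int × Int × Int × Int)
    (h : pvKey5 (pvPhi m) < pvKey5 (pvPhi x)) : ¬ pvKey5 (pvPhi x) < pvKey5 (pvPhi m) := by
  obtain ⟨t, l, b, r, a⟩ := x
  obtain ⟨t', l', b', r', a'⟩ := m
  simp only [pvKey5_phi, pv_lt5_iff] at *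
  omega

theorem pv_key_total (x m : Int × Int × Int × Int × Int)
    (h1 : ¬ pvKey x < pvKey m) (h2 : pvKey x ≠ pvKey m) : pvKey m < pvKey x := by
  obtain ⟨t, l, b, r, a⟩ := x
  obtain ⟨t', l', b', r', a'⟩ := m
  simp only [pvKey, pv_lt3_iff, List.cons.injEq, and_true, ne_eq, not_and, not_or] at *
  omega

-- the tie-order relation the candidate list satisfies
def pvQ (x y : Int × Int × Int × Int × Int) : Prop :=
  pvKey x = pvKey y → pvKey5 (pvPhi x) < pvKey5 (pvPhi y)

-- key-minimising fold (A's sorted head) = full-key-minimising fold (B's min), on a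
-- list whose equal-key elements appear in increasing full-key order
theorem pv_fold_eq : ∀ (l : List (Int × Int × Int × Int × Int))
    (acc : Option (Int × Int × Int × Int × Int)),
    l.Pairwise pvQ →
    (∀ m, acc = some m → ∀ z ∈ l, pvKey z = pvKey m → pvKey5 (pvPhi m) < pvKey5 (pvPhi z)) →
    l.foldl pvHStep acc = l.foldl pvStepF acc := by
  intro l
  induction l with
  | nil => intro acc _ _; rfl
  | cons x t ih =>
    intro acc hp hacc
    have hx : ∀ y ∈ t, pvQ x y := (List.pairwise_cons.mp hp).1
    have ht : t.Pairwise pvQ := (List.pairwise_cons.mp hp).2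
    have hkeep : ∀ z ∈ t, pvKey z = pvKey x → pvKey5 (pvPhi x) < pvKey5 (pvPhi z) := by
      intro z hz hk
      exact hx z hz hk.symm
    simp only [List.foldl_cons]
    cases acc with
    | none =>
      show t.foldl pvHStep (some x) = t.foldl pvStepF (some x)
      refine ih (some x) ht ?_
      intro m hm z hz hk
      obtain rfl : x = m := Option.some.inj hm
      exact hkeep z hz hk
    | some m =>
      have hcont : ∀ z ∈ t, pvKey z = pvKey m → pvKey5 (pvPhi m) < pvKey5 (pvPhi z) := by
        intro z hz hk
        exact hacc m rfl z (List.mem_cons_of_mem x hz) hk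
      by_cases hk : pvKey x < pvKey m
      · have hf : pvKey5 (pvPhi x) < pvKey5 (pvPhi m) := pv_key_lt_full x m hk
        rw [show pvHStep (some m) x = some x by simp [pvHStep, hk],
          show pvStepF (some m) x = some x by simp [pvStepF, hf]]
        refine ih (some x) ht ?_
        intro m' hm' z hz hkz
        obtain rfl : x = m' := Option.some.inj hm'
        exact hkeep z hz hkz
      · have hnf : ¬ pvKey5 (pvPhi x) < pvKey5 (pvPhi m) := by
          by_cases he : pvKey x = pvKey m
          · exact pv_full_asym x m (hacc m rfl x List.mem_cons_self he)
          · exact pv_full_asym x m (pv_key_lt_full m x (pv_key_total x m hk he))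
        rw [show pvHStep (some m) x = some m by simp [pvHStep, hk],
          show pvStepF (some m) x = some m by simp [pvStepF, hnf]]
        refine ih (some m) ht ?_
        intro m' hm' z hz hkz
        obtain rfl : m = m' := Option.some.inj hm'
        exact hcont z hz hkz

-- ---------- shape of candidates, and the Pairwise property ----------
theorem pv_mem_wchunk (g : List (List (Option Int))) (top left h maxW : Nat)
    (z : Int × Int × Int × Int × Int) (hz : z ∈ pvWChunk g top left h maxW) :
    ∃ w, 1 ≤ w ∧ 2 ≤ h * w ∧ z = pvMk top left h w := by
  unfold pvWChunk at hz
  obtain ⟨w, hw, hfw⟩ := List.mem_filterMap.mp hz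
  split_ifs at hfw with h1 h2
  · exact ⟨w, (List.mem_range'_1.mp hw).1, by omega, (Option.some.inj hfw).symm⟩

theorem pv_mem_hchunk (g : List (List (Option Int))) (rows cols top left : Nat)
    (z : Int × Int × Int × Int × Int) (hz : z ∈ pvHChunk g rows cols top left) :
    ∃ h w, 1 ≤ h ∧ 1 ≤ w ∧ 2 ≤ h * w ∧ z = pvMk top left h w := by
  have get : ∀ (h maxW : Nat), z ∈ pvWChunk g top left h maxW →
      ∃ w, 1 ≤ w ∧ 2 ≤ h * w ∧ z = pvMk top left h w :=
    fun h maxW hm => pv_mem_wchunk g top left h maxW z hm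
  unfold pvHChunk at hz
  split_ifs at hz with b1 b2 b3
  · simp at hz
  · simp only [List.mem_append, List.not_mem_nil, or_false] at hz
    obtain ⟨w, hw1, hw2, he⟩ := get 1 _ hz
    exact ⟨1, w, by omega, hw1, hw2, he⟩
  · simp only [List.mem_append, List.not_mem_nil, or_false] at hz
    rcases hz with hz | hz
    · obtain ⟨w, hw1, hw2, he⟩ := get 1 _ hz
      exact ⟨1, w, by omega, hw1, hw2, he⟩
    · obtain ⟨w, hw1, hw2, he⟩ := get 2 _ hz
      exact ⟨2, w, by omega, hw1, hw2, he⟩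
  · simp only [List.mem_append] at hz
    rcases hz with hz | hz | hz
    · obtain ⟨w, hw1, hw2, he⟩ := get 1 _ hz
      exact ⟨1, w, by omega, hw1, hw2, he⟩
    · obtain ⟨w, hw1, hw2, he⟩ := get 2 _ hz
      exact ⟨2, w, by omega, hw1, hw2, he⟩
    · obtain ⟨w, hw1, hw2, he⟩ := get 3 _ hz
      exact ⟨3, w, by omega, hw1, hw2, he⟩

theorem pvMk_key (top left h w : Nat) :
    pvKey (pvMk top left h w) = [((h * w : Nat) : Int), ((top : Nat) : Int), ((left : Nat) : Int)] := rfl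

theorem pvMk_full (top left h w : Nat) :
    pvKey5 (pvPhi (pvMk top left h w)) =
      [((h * w : Nat) : Int), ((top : Nat) : Int), ((left : Nat) : Int),
       ((top + h - 1 : Nat) : Int), ((left + w - 1 : Nat) : Int)] := rfl

theorem pvQ_mk (top left h w h' w' : Nat) (hh : 1 ≤ h) (hlt : h < h') :
    pvQ (pvMk top left h w) (pvMk top left h' w') := by
  intro hkey
  rw [pvMk_key, pvMk_key] at hkey
  simp only [List.cons.injEq, and_true] at hkey
  rw [pvMk_full, pvMk_full, pv_lt5_iff]
  refine Or.inr ⟨hkey, Or.inr ⟨rfl, Or.inr ⟨rfl, Or.inl ?_⟩⟩⟩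
  exact_mod_cast (by omega : top + h - 1 < top + h' - 1)

theorem pv_pairwise_wchunk (g : List (List (Option Int))) (top left h maxW : Nat)
    (hh : 1 ≤ h) : (pvWChunk g top left h maxW).Pairwise pvQ := by
  unfold pvWChunk
  rw [List.pairwise_filterMap]
  refine (List.pairwise_lt_range' 1).imp ?_
  intro w w' hlt z hz z' hz'
  have hzw : z = pvMk top left h w := by
    split_ifs at hz
    simp_all
  have hzw' : z' = pvMk top left h w' := by
    split_ifs at hz'
    simp_all
  subst hzw hzw'
  intro hkey
  exfalso
  rw [pvMk_key, pvMk_key] at hkey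
  simp only [List.cons.injEq, and_true] at hkey
  have h1 : h * w = h * w' := by exact_mod_cast hkey
  have h2 : w = w' := Nat.eq_of_mul_eq_mul_left (by omega) h1
  omega

theorem pv_pairwise_hchunk (g : List (List (Option Int))) (rows cols top left : Nat) :
    (pvHChunk g rows cols top left).Pairwise pvQ := by
  have cross : ∀ (h h' : Nat), 1 ≤ h → h < h' → ∀ mw mw',
      ∀ a ∈ pvWChunk g top left h mw, ∀ b ∈ pvWChunk g top left h' mw', pvQ a b := by
    intro h h' hh hlt mw mw' a ha b hb
    obtain ⟨w, hw1, _, rfl⟩ := pv_mem_wchunk _ _ _ _ _ _ ha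
    obtain ⟨w', hw1', _, rfl⟩ := pv_mem_wchunk _ _ _ _ _ _ hb
    exact pvQ_mk top left h w h' w' hh hlt
  unfold pvHChunk
  split_ifs with b1 b2 b3
  · exact List.Pairwise.nil
  · rw [List.pairwise_append]
    exact ⟨pv_pairwise_wchunk _ _ _ _ _ (by omega), List.Pairwise.nil, by simp⟩
  · rw [List.pairwise_append, List.pairwise_append]
    refine ⟨pv_pairwise_wchunk _ _ _ _ _ (by omega),
      ⟨pv_pairwise_wchunk _ _ _ _ _ (by omega), List.Pairwise.nil, by simp⟩, ?_⟩
    intro a ha b hb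
    simp only [List.mem_append, List.not_mem_nil, or_false] at hb
    exact cross 1 2 (by omega) (by omega) _ _ a ha b hb
  · rw [List.pairwise_append, List.pairwise_append]
    refine ⟨pv_pairwise_wchunk _ _ _ _ _ (by omega),
      ⟨pv_pairwise_wchunk _ _ _ _ _ (by omega),
       pv_pairwise_wchunk _ _ _ _ _ (by omega),
       cross 2 3 (by omega) (by omega) _ _⟩, ?_⟩
    intro a ha b hb
    rcases List.mem_append.mp hb with hb | hb
    · exact cross 1 2 (by omega) (by omega) _ _ a ha b hb
    · exact cross 1 3 (by omega) (by omega) _ _ a ha b hb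

theorem pv_pairwise_cand (g : List (List (Option Int))) : (pvCand g).Pairwise pvQ := by
  unfold pvCand
  rw [List.pairwise_flatMap]
  constructor
  · intro top _
    rw [List.pairwise_flatMap]
    constructor
    · intro left _
      exact pv_pairwise_hchunk g _ _ top left
    · refine List.pairwise_lt_range.imp ?_
      intro left left' hlt x hx y hy hkey
      obtain ⟨h, w, _, _, _, rfl⟩ := pv_mem_hchunk _ _ _ _ _ _ hx
      obtain ⟨h', w', _, _, _, rfl⟩ := pv_mem_hchunk _ _ _ _ _ _ hy
      exfalso
      rw [pvMk_key, pvMk_key] at hkey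
      simp only [List.cons.injEq, and_true] at hkey
      have : left = left' := by exact_mod_cast hkey.2.2
      omega
  · refine List.pairwise_lt_range.imp ?_
    intro top top' hlt x hx y hy hkey
    obtain ⟨left, hl, hx'⟩ := List.mem_flatMap.mp hx
    obtain ⟨left', hl', hy'⟩ := List.mem_flatMap.mp hy
    obtain ⟨h, w, _, _, _, rfl⟩ := pv_mem_hchunk _ _ _ _ _ _ hx'
    obtain ⟨h', w', _, _, _, rfl⟩ := pv_mem_hchunk _ _ _ _ _ _ hy'
    exfalso
    rw [pvMk_key, pvMk_key] at hkey
    simp only [List.cons.injEq, and_true] at hkey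
    have : top = top' := by exact_mod_cast hkey.2.1
    omega

-- ---------- head of the stable sort = running strict minimum ----------
theorem pv_head_insertBy {α : Type} (bef : α → α → Bool) (x : α) (ys : List α) :
    (PySem.List.insertBy bef x ys).head? =
      some (match ys with | [] => x | h :: _ => if bef x h then x else h) := by
  cases ys with
  | nil => simp [PySem.List.insertBy]
  | cons h t =>
    simp only [PySem.List.insertBy]
    split <;> simp

theorem pv_head_foldl_insertBy {α : Type} (bef : α → α → Bool) (l : List α) (acc : List α) :
    (l.foldl (fun acc x => PySem.List.insertBy bef x acc) acc).head? =
      l.foldl (fun o x =>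
        match o with
        | none => some x
        | some h => if bef x h then some x else some h) acc.head? := by
  induction l generalizing acc with
  | nil => rfl
  | cons x l ih =>
    simp only [List.foldl_cons]
    rw [ih]
    congr 1
    rw [pv_head_insertBy]
    cases acc with
    | nil => rfl
    | cons a t => simp only [List.head?_cons]; split <;> rfl

theorem pv_head_sorted (xs : List (Int × Int × Int × Int × Int)) :
    (PySem.List.sorted xs (fun x => [x.2.2.2.2, x.1, x.2.1]) false).head? =
      xs.foldl pvHStep none := by
  rw [PySem.List.sorted_eq_foldl_insertBy, pv_head_foldl_insertBy]
  simp only [List.head?_nil]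
  apply PySem.List.foldl_congr_mem
  intro o x _
  cases o with
  | none => rfl
  | some m => rfl

-- B's min over its comprehension = φ of A's sorted head
theorem pvMinB_head (work : List (List (Option Int))) :
    PySem.List.min? (pvCandsB work) pvKey5 = Option.map pvPhi (findValidA work).head? := by
  rw [pvCandsB_eq, pvMinB_fold, pvFindValidA_eq, pv_head_sorted,
    ← pv_fold_eq (pvCand work) none (pv_pairwise_cand work) (by simp)]

-- every candidate is a cast rectangle
theorem pv_mem_cand (g : List (List (Option Int))) (m : Int × Int × Int × Int × Int)
    (hm : m ∈ pvCand g) : ∃ top left h w, 1 ≤ h ∧ 1 ≤ w ∧ m = pvMk top left h w := by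
  unfold pvCand at hm
  obtain ⟨top, _, hm1⟩ := List.mem_flatMap.mp hm
  obtain ⟨left, _, hm2⟩ := List.mem_flatMap.mp hm1
  obtain ⟨h, w, hh, hw, _, he⟩ := pv_mem_hchunk _ _ _ _ _ _ hm2
  exact ⟨top, left, h, w, hh, hw, he⟩

-- ---------- the two clearing loops produce the same grid ----------
def pvCellF (c : Option Int) : Option Int :=
  match c with
  | none => none
  | some v => if v ≠ 0 then some 0 else some v

def pvRowStep (row : List (Option Int)) (j : Nat) : List (Option Int) :=
  match row.getD j none with
  | none => row
  | some v => if v ≠ 0 then row.set j (some 0) else row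

theorem pv_getD_getElem? (row : List (Option Int)) (j : Nat) :
    row.getD j none = row[j]?.getD none := List.getD_eq_getElem?_getD ..

theorem pv_rowstep_ne (row : List (Option Int)) (j0 j : Nat) (h : j0 ≠ j) :
    (pvRowStep row j0)[j]? = row[j]? := by
  unfold pvRowStep
  cases hc : row.getD j0 none with
  | none => rfl
  | some v =>
    show (if v ≠ 0 then row.set j0 (some 0) else row)[j]? = row[j]?
    by_cases hv : v ≠ 0
    · rw [if_pos hv]
      exact List.getElem?_set_ne h
    · rw [if_neg hv]

theorem pv_rowstep_self (row : List (Option Int)) (j : Nat) :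
    (pvRowStep row j)[j]? = row[j]?.map pvCellF := by
  unfold pvRowStep
  cases hc : row.getD j none with
  | none =>
    rw [pv_getD_getElem?] at hc
    cases he : row[j]? with
    | none => simp
    | some c =>
      rw [he] at hc
      simp only [Option.getD_some] at hc
      subst hc
      simp [pvCellF]
  | some v =>
    rw [pv_getD_getElem?] at hc
    have hlen : j < row.length := by
      by_contra hge
      rw [List.getElem?_eq_none (by omega)] at hc
      simp at hc
    rw [List.getElem?_eq_getElem hlen] at hc ⊢
    simp only [Option.getD_some] at hc
    show (if v ≠ 0 then row.set j (some 0) else row)[j]? = Option.map pvCellF (some row[j])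
    by_cases hv : v ≠ 0
    · rw [if_pos hv, List.getElem?_set_self (by omega)]
      simp [pvCellF, hc, hv]
    · rw [if_neg hv]
      rw [ne_eq, not_not] at hv
      rw [List.getElem?_eq_getElem hlen]
      simp [pvCellF, hc, hv]

def pvRowClr (row : List (Option Int)) (c1 c2 : Nat) : List (Option Int) :=
  (List.range' c1 (c2 + 1 - c1)).foldl pvRowStep row

theorem pv_foldl_rowstep_getElem? : ∀ (js : List Nat), js.Nodup →
    ∀ (row : List (Option Int)) (j : Nat),
    (js.foldl pvRowStep row)[j]? = if j ∈ js then row[j]?.map pvCellF else row[j]? := by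
  intro js
  induction js with
  | nil => intro _ row j; simp
  | cons j0 js ih =>
    intro hnd row j
    have hnd' : js.Nodup := (List.nodup_cons.mp hnd).2
    have hj0 : j0 ∉ js := (List.nodup_cons.mp hnd).1
    simp only [List.foldl_cons]
    rw [ih hnd']
    by_cases hjm : j ∈ js
    · rw [if_pos hjm, if_pos (by simp [hjm]),
        pv_rowstep_ne row j0 j (fun he => hj0 (he ▸ hjm))]
    · rw [if_neg hjm]
      by_cases hje : j = j0
      · subst hje
        rw [if_pos (by simp), pv_rowstep_self]
      · rw [if_neg (by simp [hje, hjm]), pv_rowstep_ne row j0 j (fun he => hje he.symm)]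

def pvGridStep (c1 c2 : Nat) (work : List (List (Option Int))) (i : Nat) :
    List (List (Option Int)) :=
  (List.range' c1 (c2 + 1 - c1)).foldl (fun work j =>
    match (work.getD i []).getD j none with
    | none => work
    | some v => if v ≠ 0 then work.set i ((work.getD i []).set j (some 0)) else work) work

-- the inner column loop only rewrites row i
theorem pv_gridstep_eq (c1 c2 : Nat) (w : List (List (Option Int))) (i : Nat) :
    pvGridStep c1 c2 w i = w.set i (pvRowClr (w.getD i []) c1 c2) := by
  unfold pvGridStep pvRowClr
  generalize List.range' c1 (c2 + 1 - c1) = js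
  induction js generalizing w with
  | nil =>
    simp only [List.foldl_nil]
    by_cases hlen : i < w.length
    · rw [List.getD_eq_getElem _ _ hlen, List.set_getElem_self]
    · rw [List.set_eq_of_length_le (by omega)]
  | cons j js ihj =>
    simp only [List.foldl_cons]
    have hstep : (match (w.getD i []).getD j none with
        | none => w
        | some v => if v ≠ 0 then w.set i ((w.getD i []).set j (some 0)) else w)
        = w.set i (pvRowStep (w.getD i []) j) := by
      unfold pvRowStep
      cases hc : (w.getD i []).getD j none with
      | none =>
        show w = w.set i (w.getD i [])
        by_cases hlen : i < w.length
        · rw [List.getD_eq_getElem _ _ hlen, List.set_getElem_self]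
        · rw [List.set_eq_of_length_le (by omega)]
      | some v =>
        show (if v ≠ 0 then w.set i ((w.getD i []).set j (some 0)) else w)
          = w.set i (if v ≠ 0 then (w.getD i []).set j (some 0) else (w.getD i []))
        by_cases hv : v ≠ 0
        · rw [if_pos hv, if_pos hv]
        · rw [if_neg hv, if_neg hv]
          by_cases hlen : i < w.length
          · rw [List.getD_eq_getElem _ _ hlen, List.set_getElem_self]
          · rw [List.set_eq_of_length_le (by omega)]
    have hget : (w.set i (pvRowStep (w.getD i []) j)).getD i [] = pvRowStep (w.getD i []) j := by
      by_cases hlen : i < w.length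
      · rw [List.getD_eq_getElem _ _ (by simpa using hlen), List.getElem_set_self]
      · have h0 : w.getD i [] = [] := List.getD_eq_default _ _ (by omega)
        rw [h0]
        have h1 : pvRowStep [] j = [] := rfl
        rw [h1, List.set_eq_of_length_le (by omega)]
        exact h0
    rw [hstep, ihj (w.set i (pvRowStep (w.getD i []) j)), List.set_set, hget]

theorem pvZeroA_eq_foldset (work : List (List (Option Int))) (r1 c1 r2 c2 : Nat) :
    pvZeroA work r1 c1 r2 c2
      = (List.range' r1 (r2 + 1 - r1)).foldl (fun w i => w.set i (pvRowClr (w.getD i []) c1 c2)) work := by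
  unfold pvZeroA
  apply PySem.List.foldl_congr_mem
  intro w i _
  exact pv_gridstep_eq c1 c2 w i

theorem pv_foldl_set_getElem? (c1 c2 : Nat) : ∀ (is : List Nat), is.Nodup →
    ∀ (w : List (List (Option Int))) (k : Nat),
    ((is.foldl (fun w i => w.set i (pvRowClr (w.getD i []) c1 c2)) w)[k]?)
    = if k ∈ is then w[k]?.map (fun row => pvRowClr row c1 c2) else w[k]? := by
  intro is
  induction is with
  | nil => intro _ w k; simp
  | cons i is ih =>
    intro hnd w k
    have hnd' : is.Nodup := (List.nodup_cons.mp hnd).2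
    have hi : i ∉ is := (List.nodup_cons.mp hnd).1
    simp only [List.foldl_cons]
    rw [ih hnd']
    by_cases hkm : k ∈ is
    · rw [if_pos hkm, if_pos (by simp [hkm]),
        List.getElem?_set_ne (by intro he; subst he; exact hi hkm)]
    · rw [if_neg hkm]
      by_cases hke : k = i
      · subst hke
        rw [if_pos (by simp)]
        by_cases hlen : k < w.length
        · rw [List.getElem?_set_self (by omega), List.getElem?_eq_getElem hlen,
            List.getD_eq_getElem _ _ hlen]
          rfl
        · rw [List.getElem?_eq_none (l := w.set k _) (by simp; omega),
            List.getElem?_eq_none (by omega)]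
          rfl
      · rw [if_neg (by simp [hke, hkm]), List.getElem?_set_ne (fun he => hke he.symm)]

-- B's row comprehension = the row clearing loop, cellwise
theorem pvRowClr_eq_mapB (row : List (Option Int)) (c1 c2 : Nat) :
    (PySem.List.enumerate row).map (fun q =>
      if ((c1 : Nat) : Int) ≤ q.1 ∧ q.1 ≤ ((c2 : Nat) : Int) ∧ q.2 ≠ none ∧ q.2 ≠ some 0 then
        (some 0 : Option Int) else q.2)
    = pvRowClr row c1 c2 := by
  apply List.ext_getElem?
  intro j
  rw [pvRowClr, pv_foldl_rowstep_getElem? _ (List.nodup_range' _) row j]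
  rw [List.getElem?_map, PySem.List.getElem?_enumerate]
  cases hc : row[j]? with
  | none => split <;> rfl
  | some c =>
    simp only [Option.map_some]
    by_cases hmem : j ∈ List.range' c1 (c2 + 1 - c1)
    · obtain ⟨h1, h2⟩ := List.mem_range'_1.mp hmem
      rw [if_pos hmem]
      congr 1
      cases c with
      | none => simp [pvCellF]
      | some v =>
        by_cases hv : v = 0
        · subst hv
          rw [if_neg (by simp)]
          simp [pvCellF]
        · rw [if_pos (by
            refine ⟨by simp; omega, by simp; omega, by simp, by simp [hv]⟩)]
          simp [pvCellF, hv]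
    · have hout : ¬ (c1 ≤ j ∧ j ≤ c2) := by
        intro ⟨ha, hb⟩
        exact hmem (List.mem_range'_1.mpr ⟨ha, by omega⟩)
      rw [if_neg hmem, if_neg (by
        rintro ⟨ha, hb, -, -⟩
        exact hout ⟨by omega, by omega⟩)]

-- A's clearing loop = B's clearing comprehension
theorem pvClear_eq (work : List (List (Option Int))) (r1 c1 r2 c2 : Nat) :
    pvClearB work ((r1 : Nat) : Int) ((c1 : Nat) : Int) ((r2 : Nat) : Int) ((c2 : Nat) : Int)
      = pvZeroA work r1 c1 r2 c2 := by
  rw [pvZeroA_eq_foldset]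
  apply List.ext_getElem?
  intro k
  rw [pv_foldl_set_getElem? c1 c2 _ (List.nodup_range' _) work k]
  unfold pvClearB
  rw [List.getElem?_map, PySem.List.getElem?_enumerate]
  cases hr : work[k]? with
  | none => split <;> rfl
  | some row =>
    simp only [Option.map_some]
    by_cases hmem : k ∈ List.range' r1 (r2 + 1 - r1)
    · obtain ⟨h1, h2⟩ := List.mem_range'_1.mp hmem
      rw [if_pos hmem]
      congr 1
      rw [← pvRowClr_eq_mapB]
      apply List.map_congr_left
      intro q _
      have hr1 : ((r1 : Nat) : Int) ≤ 0 + (k : Int) := by omega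
      have hr2 : (0 : Int) + (k : Int) ≤ ((r2 : Nat) : Int) := by omega
      by_cases hcnd : ((c1 : Nat) : Int) ≤ q.1 ∧ q.1 ≤ ((c2 : Nat) : Int) ∧ q.2 ≠ none ∧ q.2 ≠ some 0
      · rw [if_pos ⟨hr1, hr2, hcnd.1, hcnd.2.1, hcnd.2.2.1, hcnd.2.2.2⟩, if_pos hcnd]
      · rw [if_neg (by tauto), if_neg hcnd]
    · have hout : ¬ (r1 ≤ k ∧ k ≤ r2) := by
        intro ⟨ha, hb⟩
        exact hmem (List.mem_range'_1.mpr ⟨ha, by omega⟩)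
      rw [if_neg hmem]
      congr 1
      have : ∀ q ∈ PySem.List.enumerate row,
          (if ((r1 : Nat) : Int) ≤ (0 : Int) + (k : Int) ∧ (0 : Int) + (k : Int) ≤ ((r2 : Nat) : Int) ∧
              ((c1 : Nat) : Int) ≤ q.1 ∧ q.1 ≤ ((c2 : Nat) : Int) ∧ q.2 ≠ none ∧ q.2 ≠ some 0 then
            (some 0 : Option Int) else q.2) = q.2 := by
        intro q _
        rw [if_neg (by
          rintro ⟨ha, hb, -⟩
          exact hout ⟨by omega, by omega⟩)]
      rw [List.map_congr_left this, PySem.List.map_snd_enumerate]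

-- ---------- the two greedy loops agree ----------
theorem pvLoop_eq : ∀ (n : Nat) (work : List (List (Option Int)))
    (steps : List (Int × Int × Int × Int × Int)) (step maxs : Int),
    (maxs - step).toNat = n → pvLoopB work steps step maxs = pvGreedyA n work steps := by
  intro n
  induction n with
  | zero =>
    intro work steps step maxs hn
    unfold pvLoopB
    rw [dif_neg (by omega)]
    rfl
  | succ n ih =>
    intro work steps step maxs hn
    unfold pvLoopB
    rw [dif_pos (by omega)]
    have hA : pvGreedyA (n+1) work steps = (match findValidA work with
      | [] => (steps, work)
      | m :: _ =>
        pvGreedyA n (pvZeroA work m.1.toNat m.2.1.toNat m.2.2.1.toNat m.2.2.2.1.toNat)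
          (steps ++ [m])) := rfl
    rw [hA, pvMinB_head work]
    cases hs : findValidA work with
    | nil => rfl
    | cons m rest =>
      have hmem : m ∈ pvCand work := by
        have hm : m ∈ findValidA work := by
          rw [hs]; exact List.mem_cons_self
        rw [pvFindValidA_eq] at hm
        exact (PySem.List.mem_sorted _ _ _ _).mp hm
      obtain ⟨top, left, h, w, hh, hw, rfl⟩ := pv_mem_cand _ _ hmem
      show pvLoopB
          (pvClearB work ((top : Nat) : Int) ((left : Nat) : Int)
            ((top + h - 1 : Nat) : Int) ((left + w - 1 : Nat) : Int))
          (steps ++ [(((top : Nat) : Int), ((left : Nat) : Int), ((top + h - 1 : Nat) : Int),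
            ((left + w - 1 : Nat) : Int), ((h * w : Nat) : Int))]) (step + 1) maxs
        = pvGreedyA n (pvZeroA work ((top : Nat) : Int).toNat ((left : Nat) : Int).toNat
            ((top + h - 1 : Nat) : Int).toNat ((left + w - 1 : Nat) : Int).toNat) (steps ++ [pvMk top left h w])
      rw [pvClear_eq work top left (top + h - 1) (left + w - 1)]
      simp only [Int.toNat_natCast]
      exact ih _ _ _ _ (by omega)

-- ===== VERDICT (by name: the statement is the Claim_ definition above) =====
theorem greedy_sequence_spec : Claim_equal_greedy_sequence := by
  intro grid max_steps _ _
  unfold Spec_greedy_sequence greedy_sequence greedy_sequence_alt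
  exact (pvLoop_eq max_steps.toNat grid [] 0 max_steps (by omega)).symm
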